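-- pv_equiv track=rewrite | github.com/MrBrantCode/unitest_baseline | mut_generate/mist_train_cf/cf_44580/solution.py | extend_string
-- ===== SOURCE A (Python) =====
-- def extend_string(s):
--     if not s:
--         return "Input string cannot be empty."
--
--     while len(s) < 8:
--         for char in s:
--             if len(s) < 8:
--                 s += char
--             else:
--                 break
--     return s
-- ===== SOURCE B (Python) =====
-- def extend_string(s):
--     if not s:
--         return "Input string cannot be empty."
--     if len(s) >= 8:
--         return s
--     return (s * (8 // len(s) + 1))[:8]
-- ===== Notes on version B (the rewrite author's own statement) =====
-- stated objective: simpler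
-- what changed: Replaces A's nested while/for snapshot-append loop with a closed-form multiply-and-slice: (s * (8 // len(s) + 1))[:8].
import Mathlib
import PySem

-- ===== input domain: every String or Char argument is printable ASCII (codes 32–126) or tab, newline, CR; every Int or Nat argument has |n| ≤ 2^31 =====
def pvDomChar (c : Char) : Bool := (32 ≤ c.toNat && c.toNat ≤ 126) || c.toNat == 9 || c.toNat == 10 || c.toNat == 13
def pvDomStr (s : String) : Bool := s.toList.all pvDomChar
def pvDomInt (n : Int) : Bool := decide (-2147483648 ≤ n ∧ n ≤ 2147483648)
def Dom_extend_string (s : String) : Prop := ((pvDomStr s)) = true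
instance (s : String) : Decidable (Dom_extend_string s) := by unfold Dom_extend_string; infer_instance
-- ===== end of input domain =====

-- B replaces A's nested while/for snapshot-append loop by a closed-form multiply-and-slice (simpler).

-- ===== PORT A =====
-- `for char in s: if len(s) < 8: s += char else: break` — the for iterates over the
-- snapshot taken at loop entry while s grows.
def esForLoop : List Char → List Char → List Char
  | [], s => s
  | c :: rest, s => if s.length < 8 then esForLoop rest (s ++ [c]) else s

-- `while len(s) < 8: <for loop over s>`; the `_h` test is only a totality guard
-- (it always holds when the body runs on a nonempty s, as the proofs below show).
def esWhileLoop (s : List Char) : List Char :=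
  if s.length < 8 then
    if _h : s.length < (esForLoop s s).length then esWhileLoop (esForLoop s s)
    else esForLoop s s
  else s
termination_by 8 - s.length
decreasing_by omega

def extend_string (s : String) : String :=
  if s.toList = [] then "Input string cannot be empty."
  else String.ofList (esWhileLoop s.toList)

-- ===== PORT B =====
def extend_string_alt (s : String) : String :=
  let l := s.toList
  if l = [] then "Input string cannot be empty."
  else if 8 ≤ l.length then s
  else String.ofList (((List.replicate (8 / l.length + 1) l).flatten).take 8)  -- (s * n)[:8]

-- ===== PRECONDITION & SPEC =====
def Spec_extend_string (s : String) (out : String) : Prop := out = extend_string_alt s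
instance (s : String) (out : String) : Decidable (Spec_extend_string s out) := by unfold Spec_extend_string; infer_instance

-- ===== CLAIM (what is proved, stated in full; the proofs are below) =====
def Claim_equal_extend_string : Prop := ∀ (s : String), Dom_extend_string s → Spec_extend_string s (extend_string s)

-- ===== LEMMAS AND PROOFS =====

theorem es_length_rep (l : List Char) (m : ℕ) :
    ((List.replicate m l).flatten).length = m * l.length := by
  simp [List.length_flatten, List.map_replicate, List.sum_replicate, smul_eq_mul]

theorem es_take_rep_le (l : List Char) (k m m' : ℕ) (h : k ≤ m * l.length) (h' : m ≤ m') :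
    ((List.replicate m l).flatten).take k = ((List.replicate m' l).flatten).take k := by
  have hm : m' = m + (m' - m) := by omega
  rw [hm, List.replicate_add, List.flatten_append, List.take_append, es_length_rep]
  have h0 : k - m * l.length = 0 := by omega
  simp [h0]

-- take k of m repetitions is independent of m once m * L ≥ k
theorem es_take_rep (l : List Char) (k m m' : ℕ)
    (h : k ≤ m * l.length) (h' : k ≤ m' * l.length) :
    ((List.replicate m l).flatten).take k = ((List.replicate m' l).flatten).take k := by
  rcases le_total m m' with hle | hle
  · exact es_take_rep_le l k m m' h hle
  · exact (es_take_rep_le l k m' m h' hle).symm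

theorem es_forLoop_eq (snap : List Char) : ∀ s : List Char,
    esForLoop snap s = s ++ snap.take (8 - s.length) := by
  induction snap with
  | nil => intro s; simp [esForLoop]
  | cons c rest ih =>
    intro s
    by_cases h : s.length < 8
    · rw [esForLoop, if_pos h, ih]
      have h8 : 8 - s.length = (8 - (s ++ [c]).length) + 1 := by simp; omega
      simp [h8, List.take_succ_cons]
    · rw [esForLoop, if_neg h]
      have : 8 - s.length = 0 := by omega
      simp [this]

theorem es_lt_div (L : ℕ) (h : 0 < L) : 8 < (8 / L + 1) * L := by
  have h2 := Nat.div_add_mod 8 L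
  have h3 := Nat.mod_lt 8 h
  calc 8 = L * (8 / L) + 8 % L := h2.symm
    _ < L * (8 / L) + L := by omega
    _ = (8 / L + 1) * L := by ring

theorem es_whileLoop_done (s : List Char) (h : ¬ s.length < 8) : esWhileLoop s = s := by
  rw [esWhileLoop]; simp [h]

-- main loop lemma: on m ≥ 1 repetitions of a nonempty l with total length < 8,
-- the while loop produces the first 8 characters of the 8-fold repetition
theorem es_whileLoop_rep_aux (l : List Char) (hl : l ≠ []) :
    ∀ n m : ℕ, 1 ≤ m → m * l.length < 8 → 8 - m * l.length ≤ n →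
    esWhileLoop ((List.replicate m l).flatten) = ((List.replicate 8 l).flatten).take 8 := by
  have hL : 1 ≤ l.length := List.length_pos_iff.mpr hl
  have h8L : 8 ≤ 8 * l.length := Nat.le_mul_of_pos_right 8 (by omega)
  intro n
  induction n with
  | zero =>
    intro m hm hlt hn
    have hpos : 0 < m * l.length := Nat.mul_pos (by omega) (by omega)
    omega
  | succ n ih =>
    intro m hm hlt hn
    have hpos : 0 < m * l.length := Nat.mul_pos (by omega) (by omega)
    have hlen : ((List.replicate m l).flatten).length = m * l.length := es_length_rep l m
    have hslt : ((List.replicate m l).flatten).length < 8 := by omega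
    have hfor := es_forLoop_eq ((List.replicate m l).flatten) ((List.replicate m l).flatten)
    have h2len : (2 * m) * l.length = m * l.length + m * l.length := by ring
    have hlen2 : ((List.replicate (2 * m) l).flatten).length = (2 * m) * l.length :=
      es_length_rep l (2 * m)
    have hdblrep : (List.replicate m l).flatten ++ (List.replicate m l).flatten
        = (List.replicate (2 * m) l).flatten := by
      rw [two_mul, List.replicate_add, List.flatten_append]
    by_cases hbig : 8 ≤ m * l.length + m * l.length
    · -- one more pass reaches exactly length 8
      have hval : esForLoop ((List.replicate m l).flatten) ((List.replicate m l).flatten)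
          = ((List.replicate 8 l).flatten).take 8 := by
        rw [hfor]
        have hle8 : ((List.replicate m l).flatten).length ≤ 8 := by omega
        have h1 : (List.replicate m l).flatten ++
            ((List.replicate m l).flatten).take (8 - ((List.replicate m l).flatten).length)
            = ((List.replicate m l).flatten ++ (List.replicate m l).flatten).take 8 := by
          rw [List.take_append]
          rw [List.take_of_length_le hle8]
        rw [h1, hdblrep]
        exact es_take_rep l 8 (2 * m) 8 (by omega) h8L
      have hlen' : (esForLoop ((List.replicate m l).flatten) ((List.replicate m l).flatten)).length
          = 8 := by
        rw [hval, List.length_take, es_length_rep]; omega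
      rw [esWhileLoop, if_pos hslt, dif_pos (by omega)]
      rw [es_whileLoop_done _ (by omega), hval]
    · -- the pass doubles s
      have hdbl : esForLoop ((List.replicate m l).flatten) ((List.replicate m l).flatten)
          = (List.replicate (2 * m) l).flatten := by
        have hhalf : ((List.replicate m l).flatten).length
            ≤ 8 - ((List.replicate m l).flatten).length := by omega
        rw [hfor, List.take_of_length_le hhalf, hdblrep]
      rw [esWhileLoop, if_pos hslt, hdbl]
      rw [dif_pos (by omega)]
      exact ih (2 * m) (by omega) (by omega) (by omega)

theorem es_whileLoop_rep (l : List Char) (hl : l ≠ []) (m : ℕ) (hm : 1 ≤ m)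
    (hlt : m * l.length < 8) :
    esWhileLoop ((List.replicate m l).flatten) = ((List.replicate 8 l).flatten).take 8 :=
  es_whileLoop_rep_aux l hl 8 m hm hlt (by omega)

-- ===== VERDICT (by name: the statement is the Claim_ definition above) =====
theorem extend_string_spec : Claim_equal_extend_string := by
  intro s _
  unfold Spec_extend_string extend_string extend_string_alt
  by_cases he : s.toList = []
  · simp [he]
  · simp only [if_neg he]
    by_cases h8 : 8 ≤ s.toList.length
    · rw [if_pos h8, es_whileLoop_done _ (by omega)]
      exact String.ofList_toList
    · rw [if_neg h8]
      have hL : 1 ≤ s.toList.length := List.length_pos_iff.mpr he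
      have h1 : (List.replicate 1 s.toList).flatten = s.toList := by simp
      have hw := es_whileLoop_rep s.toList he 1 le_rfl (by omega)
      rw [h1] at hw
      rw [hw]
      congr 1
      have hn : 8 ≤ (8 / s.toList.length + 1) * s.toList.length :=
        (es_lt_div s.toList.length (by omega)).le
      exact es_take_rep s.toList 8 8 (8 / s.toList.length + 1)
        (Nat.le_mul_of_pos_right 8 (by omega)) hn
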